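-- pv_equiv track=rewrite | github.com/charlie068/umi_varcal | functions/func.py | QualIsValid
-- ===== SOURCE A (Python) =====
-- def QualIsValid(qual, quals, min_read_qual):
-- 	total = 0
-- 	l_read = len(qual)
-- 	threshold = min_read_qual*l_read
--
-- 	step = 0
-- 	for q in qual:
-- 		total += quals[q]
-- 		step += 1
-- 		if step == 10:
-- 			if total >= threshold:
-- 				return True
-- 			step=0
--
--
-- 	return False
-- ===== SOURCE B (Python) =====
-- def QualIsValid(qual, quals, min_read_qual):
--     # pass 1: build the prefix-sum table of the quality values
--     cums = []
--     t = 0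
--     for q in qual:
--         t += quals[q]
--         cums.append(t)
--     threshold = min_read_qual * len(qual)
--     # pass 2: a checkpoint fires at every 10th character
--     return any(c >= threshold for i, c in enumerate(cums) if i % 10 == 9)
-- ===== Notes on version B (the rewrite author's own statement) =====
-- stated objective: alternative
-- what changed: Replaces the interleaved step-counter loop with early return by a prefix-sum table built in one pass plus a separate strided any() over every 10th cumulative value.
import Mathlib
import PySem

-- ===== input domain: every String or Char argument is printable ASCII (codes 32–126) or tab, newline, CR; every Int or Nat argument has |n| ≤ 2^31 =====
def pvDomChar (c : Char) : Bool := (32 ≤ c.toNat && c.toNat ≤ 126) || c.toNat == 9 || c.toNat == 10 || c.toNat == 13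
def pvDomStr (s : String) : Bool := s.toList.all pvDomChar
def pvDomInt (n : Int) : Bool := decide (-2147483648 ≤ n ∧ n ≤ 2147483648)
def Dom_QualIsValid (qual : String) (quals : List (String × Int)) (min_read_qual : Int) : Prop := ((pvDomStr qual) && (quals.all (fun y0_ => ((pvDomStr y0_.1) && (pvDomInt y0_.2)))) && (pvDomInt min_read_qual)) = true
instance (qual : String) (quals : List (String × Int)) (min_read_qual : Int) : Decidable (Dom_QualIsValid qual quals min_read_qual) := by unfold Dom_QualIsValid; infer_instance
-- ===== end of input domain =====

-- B replaces A's interleaved step-counter loop (with early return) by a prefix-sum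
-- table plus a separate strided scan of every 10th cumulative value (objective: alternative).

-- ===== PORT A =====
-- the for-loop of A: state (total, step), early return True at a passed checkpoint
def qivLoopA (quals : PySem.Dict String Int) (threshold : Int) :
    List Char → Int → Int → Bool
  | [], _, _ => false
  | q :: rest, total, step =>
    let total := total + quals.getD (String.mk [q]) 0   -- quals[q]; Pre_ guarantees the key exists
    let step := step + 1
    if step == 10 then
      if total ≥ threshold then true
      else qivLoopA quals threshold rest total 0
    else qivLoopA quals threshold rest total step

def QualIsValid (qual : String) (quals : List (String × Int)) (min_read_qual : Int) : Bool :=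
  let l_read : Int := (qual.toList.length : Int)
  let threshold := min_read_qual * l_read
  qivLoopA (PySem.Dict.mk quals) threshold qual.toList 0 0

-- ===== PORT B =====
-- pass 1 of B: the prefix-sum table cums
def qivCums (quals : PySem.Dict String Int) : List Char → Int → List Int
  | [], _ => []
  | q :: rest, t =>
    let t := t + quals.getD (String.mk [q]) 0
    t :: qivCums quals rest t

def QualIsValid_alt (qual : String) (quals : List (String × Int)) (min_read_qual : Int) : Bool :=
  let cums := qivCums (PySem.Dict.mk quals) qual.toList 0
  let threshold := min_read_qual * (qual.toList.length : Int)
  (PySem.List.enumerate cums).any (fun p => PySem.Int.mod p.1 10 == 9 && decide (p.2 ≥ threshold))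

-- ===== PRECONDITION & SPEC =====
-- Pre_ excludes exactly the inputs where A raises KeyError: a character of qual absent from quals.
def Pre_QualIsValid (qual : String) (quals : List (String × Int)) (min_read_qual : Int) : Prop :=
  (qual.toList.all (fun c => quals.any (fun p => p.1.toList == [c]))) = true
instance (qual : String) (quals : List (String × Int)) (min_read_qual : Int) : Decidable (Pre_QualIsValid qual quals min_read_qual) := by unfold Pre_QualIsValid; infer_instance
def pvWitness_QualIsValid : String × (List (String × Int)) × Int :=
  ("ABBA", [("A", 30), ("B", 25)], 2)

def Spec_QualIsValid (qual : String) (quals : List (String × Int)) (min_read_qual : Int) (out : Bool) : Prop := out = QualIsValid_alt qual quals min_read_qual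
instance (qual : String) (quals : List (String × Int)) (min_read_qual : Int) (out : Bool) : Decidable (Spec_QualIsValid qual quals min_read_qual out) := by unfold Spec_QualIsValid; infer_instance

-- ===== CLAIM (what is proved, stated in full; the proofs are below) =====
def Claim_equal_QualIsValid : Prop := ∀ (qual : String) (quals : List (String × Int)) (min_read_qual : Int), Dom_QualIsValid qual quals min_read_qual → Pre_QualIsValid qual quals min_read_qual → Spec_QualIsValid qual quals min_read_qual (QualIsValid qual quals min_read_qual)

-- ===== LEMMAS AND PROOFS =====

-- reference checkpoint scan over the prefix sums, with A's step counter
def qivChk (threshold : Int) : List Int → Int → Bool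
  | [], _ => false
  | c :: rest, step =>
    let step := step + 1
    if step == 10 then
      if c ≥ threshold then true
      else qivChk threshold rest 0
    else qivChk threshold rest step

-- A's loop equals the checkpoint scan of B's prefix sums
lemma qivLoopA_eq_chk (quals : PySem.Dict String Int) (thr : Int) :
    ∀ (l : List Char) (t s : Int),
      qivLoopA quals thr l t s = qivChk thr (qivCums quals l t) s := by
  intro l
  induction l with
  | nil => intro t s; rfl
  | cons q rest ih =>
    intro t s
    simp only [qivLoopA, qivCums, qivChk]
    split_ifs <;> simp [ih]

-- Python's %, with the positive divisor 10, is plain emod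
lemma qivMod (a : Int) : PySem.Int.mod a 10 = a % 10 := by
  simp only [PySem.Int.mod]; rw [Int.fmod_eq_emod]; simp

-- the checkpoint scan at counter k % 10 equals the strided any over positions enumerated from k
lemma qivChk_eq_any (thr : Int) :
    ∀ (cs : List Int) (k : Nat),
      qivChk thr cs ((k : Int) % 10) =
        (PySem.List.enumerate cs (k : Int)).any
          (fun p => p.1 % 10 == 9 && decide (p.2 ≥ thr)) := by
  intro cs
  induction cs with
  | nil => intro k; rfl
  | cons c rest ih =>
    intro k
    rw [PySem.List.enumerate_cons]
    simp only [qivChk, List.any_cons]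
    by_cases h : (k : Int) % 10 = 9
    · have h10 : (k : Int) % 10 + 1 = 10 := by omega
      have hz : ((k + 1 : Nat) : Int) % 10 = 0 := by push_cast; omega
      by_cases hc : c ≥ thr
      · simp [h, hc]
      · have hrec := ih (k + 1)
        rw [hz] at hrec
        push_cast at hrec
        simp [h, hc, hrec]
    · have hne : ¬ ((k : Int) % 10 + 1 = 10) := by
        have := Int.emod_nonneg (k : Int) (by norm_num : (10:Int) ≠ 0)
        have := Int.emod_lt_of_pos (k : Int) (by norm_num : (0:Int) < 10)
        omega
      have hs : ((k + 1 : Nat) : Int) % 10 = (k : Int) % 10 + 1 := by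
        have := Int.emod_nonneg (k : Int) (by norm_num : (10:Int) ≠ 0)
        push_cast; omega
      have hrec := ih (k + 1)
      rw [hs] at hrec
      push_cast at hrec
      simp only [beq_iff_eq, hne, if_false]
      simp [h, hrec]

-- ===== VERDICT (by name: the statement is the Claim_ definition above) =====
theorem QualIsValid_spec : Claim_equal_QualIsValid := by
  intro qual quals min_read_qual _ _
  unfold Spec_QualIsValid QualIsValid QualIsValid_alt
  simp only [qivMod]
  rw [qivLoopA_eq_chk]
  have h2 := qivChk_eq_any (min_read_qual * (qual.toList.length : Int))
    (qivCums (PySem.Dict.mk quals) qual.toList 0) 0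
  norm_num at h2
  exact h2
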